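-- pv_equiv track=rewrite | github.com/alexprengere/advent_of_code | 2025/12/python/main.py | stuck_to
-- ===== SOURCE A (Python) =====
-- F = frozenset
--
-- def stuck_to(candidate, placed_shapes):
--     # This is a simple heuristic to avoid generating shapes
--     # that are not connected to the already placed ones.
--     if not placed_shapes:
--         return True
--     for x, y in candidate:
--         neighbors = F({(x - 1, y), (x + 1, y), (x, y - 1), (x, y + 1)})
--         for shape in placed_shapes:
--             if not shape.isdisjoint(neighbors):
--                 return True
--     return False
-- ===== SOURCE B (Python) =====
-- def stuck_to(candidate, placed_shapes):
--     if not placed_shapes: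
--         return True
--     cand = set(candidate)
--     for shape in placed_shapes:
--         for x, y in shape:
--             if (x - 1, y) in cand or (x + 1, y) in cand \
--                or (x, y - 1) in cand or (x, y + 1) in cand:
--                 return True
--     return False
-- ===== Notes on version B (the rewrite author's own statement) =====
-- stated objective: faster
-- what changed: B inverts the traversal: instead of looping over candidate cells and testing each placed shape for non-disjointness with a 4-neighbor frozenset, it builds a set index over the candidate once and makes a single pass over placed cells, testing each cell's four neighbors against that index.
import Mathlib
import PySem

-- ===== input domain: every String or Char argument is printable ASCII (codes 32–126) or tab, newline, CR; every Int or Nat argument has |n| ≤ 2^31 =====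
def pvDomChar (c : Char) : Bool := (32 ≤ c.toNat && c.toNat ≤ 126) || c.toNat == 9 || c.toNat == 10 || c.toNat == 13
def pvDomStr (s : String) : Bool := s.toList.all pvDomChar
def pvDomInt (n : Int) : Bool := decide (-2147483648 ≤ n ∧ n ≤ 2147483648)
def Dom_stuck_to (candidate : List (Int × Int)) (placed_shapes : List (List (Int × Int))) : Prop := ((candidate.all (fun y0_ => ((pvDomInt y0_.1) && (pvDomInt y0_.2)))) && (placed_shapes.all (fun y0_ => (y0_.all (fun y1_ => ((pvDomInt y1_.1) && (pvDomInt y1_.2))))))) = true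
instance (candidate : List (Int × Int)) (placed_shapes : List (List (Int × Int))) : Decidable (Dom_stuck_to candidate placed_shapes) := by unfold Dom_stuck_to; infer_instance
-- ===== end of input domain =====

-- B inverts the traversal: a candidate-set index is built once, then a single pass over placed cells
-- tests each cell's four neighbors against it (alternative decomposition; same result).
-- ===== PORT A =====
def stuck_to (candidate : List (Int × Int)) (placed_shapes : List (List (Int × Int))) : Bool :=
  if placed_shapes.isEmpty then true
  else
    candidate.any (fun p =>
      let neighbors : PySem.Set (Int × Int) :=
        PySem.Set.ofList [(p.1 - 1, p.2), (p.1 + 1, p.2), (p.1, p.2 - 1), (p.1, p.2 + 1)]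
      placed_shapes.any (fun shape => !(PySem.Set.isdisjoint shape neighbors)))

-- ===== PORT B =====
def stuck_to_alt (candidate : List (Int × Int)) (placed_shapes : List (List (Int × Int))) : Bool :=
  if placed_shapes.isEmpty then true
  else
    let cand : PySem.Set (Int × Int) := PySem.Set.ofList candidate
    placed_shapes.any (fun shape => shape.any (fun q =>
      PySem.Set.contains cand (q.1 - 1, q.2) || PySem.Set.contains cand (q.1 + 1, q.2) ||
      PySem.Set.contains cand (q.1, q.2 - 1) || PySem.Set.contains cand (q.1, q.2 + 1)))

-- ===== PRECONDITION & SPEC =====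
def Spec_stuck_to (candidate : List (Int × Int)) (placed_shapes : List (List (Int × Int))) (out : Bool) : Prop := out = stuck_to_alt candidate placed_shapes
instance (candidate : List (Int × Int)) (placed_shapes : List (List (Int × Int))) (out : Bool) : Decidable (Spec_stuck_to candidate placed_shapes out) := by unfold Spec_stuck_to; infer_instance

-- ===== CLAIM (what is proved, stated in full; the proofs are below) =====
def Claim_equal_stuck_to : Prop := ∀ (candidate : List (Int × Int)) (placed_shapes : List (List (Int × Int))), Dom_stuck_to candidate placed_shapes → Spec_stuck_to candidate placed_shapes (stuck_to candidate placed_shapes)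

-- ===== LEMMAS AND PROOFS =====

-- ===== VERDICT (by name: the statement is the Claim_ definition above) =====
theorem stuck_to_spec : Claim_equal_stuck_to := by
  intro candidate placed_shapes _
  unfold Spec_stuck_to stuck_to stuck_to_alt
  split
  · rfl
  · rw [Bool.eq_iff_iff]
    simp only [List.any_eq_true, Bool.not_eq_true', Bool.eq_false_iff, ne_eq,
      PySem.Set.isdisjoint_iff, PySem.Set.contains, PySem.Set.mem_ofList,
      Bool.or_eq_true, List.contains_iff_mem, List.mem_cons, List.not_mem_nil, or_false]
    push Not
    constructor
    · rintro ⟨⟨px, py⟩, hp, shape, hs, ⟨qx, qy⟩, hq, hnb⟩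
      refine ⟨shape, hs, (qx, qy), hq, ?_⟩
      rcases hnb with h | h | h | h <;>
        simp only [Prod.mk.injEq] at h <;> obtain ⟨h1, h2⟩ := h <;> subst h1 <;> subst h2
      · left; left; right; simpa using hp
      · left; left; left; simpa using hp
      · right; simpa using hp
      · left; right; simpa using hp
    · rintro ⟨shape, hs, ⟨qx, qy⟩, hq, h⟩
      rcases h with ((h | h) | h) | h <;>
        exact ⟨_, h, shape, hs, (qx, qy), hq, by simp [Prod.ext_iff]; try omega⟩
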